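-- pv_equiv track=rewrite | github.com/androidx/androidx | development/release-notes/generateReleaseNotes.py | getVersionToReleaseNotesMap
-- ===== SOURCE A (Python) =====
-- def getVersionToReleaseNotesMap(releaseJsonObject, groupId):
-- 	""" Iterates over the LibraryReleaseNotes list and creates a map from project.version to List of
-- 		LibraryReleaseNotes. Thus, each artifactId of the same version will be collected together
-- 		as list for that version. This is done so that release notes can be collected for all
-- 		artifactIds of the same version.
--
-- 		@param releaseJsonObject The json object containing all information about the release
-- 		@param groupId the groupId to generate this mapping for
-- 	"""
-- 	versionToArtifactRNMap = {}
-- 	for artifact in releaseJsonObject["modules"][groupId]: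
-- 		if artifact["version"] in versionToArtifactRNMap:
-- 			versionToArtifactRNMap[artifact["version"]].append(artifact)
-- 		else:
-- 			versionToArtifactRNMap[artifact["version"]] = [artifact]
-- 	return versionToArtifactRNMap
-- ===== SOURCE B (Python) =====
-- def getVersionToReleaseNotesMap(releaseJsonObject, groupId):
-- 	""" Same mapping, built by recursive partition: take the first artifact's version,
-- 		collect all artifacts of that version with one filter pass, then recurse on the
-- 		artifacts of the remaining versions. First-occurrence key order is preserved.
-- 	"""
-- 	def group(artifacts):
-- 		if not artifacts:
-- 			return {}
-- 		head, rest = artifacts[0], artifacts[1:]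
-- 		v = head["version"]
-- 		result = {v: [head] + [a for a in rest if a["version"] == v]}
-- 		result.update(group([a for a in rest if a["version"] != v]))
-- 		return result
-- 	return group(releaseJsonObject["modules"][groupId])
-- ===== Notes on version B (the rewrite author's own statement) =====
-- stated objective: alternative
-- what changed: Replaces A's single-pass dict accumulation (per-element lookup-then-append-or-insert) by a recursive partition: take the first artifact's version, gather that whole group with one filter pass, and recurse on the artifacts of the remaining versions.
import Mathlib
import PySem

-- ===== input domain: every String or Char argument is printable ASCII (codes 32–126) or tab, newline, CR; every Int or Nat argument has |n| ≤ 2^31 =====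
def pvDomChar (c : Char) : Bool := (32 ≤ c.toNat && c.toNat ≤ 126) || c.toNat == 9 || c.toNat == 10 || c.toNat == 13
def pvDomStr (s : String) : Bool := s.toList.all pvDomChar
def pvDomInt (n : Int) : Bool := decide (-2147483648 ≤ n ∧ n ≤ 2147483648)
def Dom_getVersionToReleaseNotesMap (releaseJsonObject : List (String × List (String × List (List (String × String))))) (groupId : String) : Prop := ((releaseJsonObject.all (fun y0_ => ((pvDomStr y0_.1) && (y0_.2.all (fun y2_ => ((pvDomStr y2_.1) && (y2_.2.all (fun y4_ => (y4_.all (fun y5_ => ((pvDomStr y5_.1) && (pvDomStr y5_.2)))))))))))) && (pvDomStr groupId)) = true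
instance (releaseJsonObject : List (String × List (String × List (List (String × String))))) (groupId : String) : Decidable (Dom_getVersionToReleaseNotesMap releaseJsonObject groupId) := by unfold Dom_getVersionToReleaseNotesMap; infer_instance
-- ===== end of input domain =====

-- B replaces A's single-pass dict accumulation by a recursive partition on the first
-- artifact's version (objective: alternative decomposition, not faster).

-- artifact["version"] (both Pythons read it the same way; Pre_ guarantees the key is present)
def pvVer (a : List (String × String)) : String := (PySem.Dict.mk a).getD "version" ""

-- ===== PORT A =====
def getVersionToReleaseNotesMap (releaseJsonObject : List (String × List (String × List (List (String × String))))) (groupId : String) : List (String × List (List (String × String))) :=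
  let d := ((PySem.Dict.mk ((PySem.Dict.mk releaseJsonObject).getD "modules" [])).getD groupId []).foldl
    (fun d artifact =>
      if d.contains (pvVer artifact) then
        d.insert (pvVer artifact) (d.getD (pvVer artifact) [] ++ [artifact])
      else
        d.insert (pvVer artifact) [artifact])
    PySem.Dict.empty
  d.items

-- ===== PORT B =====
-- Source B's inner 'group': '{v: [head]+same}' then 'result.update(group(rest-of-other-versions))';
-- every key of the recursive result differs from v, so the update appends — ported as cons.
def pvGroup : List (List (String × String)) → List (String × List (List (String × String)))
  | [] => []
  | head :: rest =>
    (pvVer head, head :: rest.filter (fun a => pvVer a == pvVer head)) ::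
      pvGroup (rest.filter (fun a => pvVer a != pvVer head))
termination_by l => l.length
decreasing_by
  simpa using Nat.lt_succ_of_le (List.length_filter_le _ rest)

def getVersionToReleaseNotesMap_alt (releaseJsonObject : List (String × List (String × List (List (String × String))))) (groupId : String) : List (String × List (List (String × String))) :=
  pvGroup ((PySem.Dict.mk ((PySem.Dict.mk releaseJsonObject).getD "modules" [])).getD groupId [])

-- ===== PRECONDITION & SPEC =====
-- Pre_ excludes exactly the inputs where the Python raises KeyError: a missing "modules" key,
-- a groupId absent from it, or an artifact without a "version" key (B raises there too).
def Pre_getVersionToReleaseNotesMap (releaseJsonObject : List (String × List (String × List (List (String × String))))) (groupId : String) : Prop :=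
  (PySem.Dict.mk releaseJsonObject).contains "modules" = true ∧
  (PySem.Dict.mk ((PySem.Dict.mk releaseJsonObject).getD "modules" [])).contains groupId = true ∧
  ∀ a ∈ (PySem.Dict.mk ((PySem.Dict.mk releaseJsonObject).getD "modules" [])).getD groupId [],
    (PySem.Dict.mk a).contains "version" = true
instance (releaseJsonObject : List (String × List (String × List (List (String × String))))) (groupId : String) : Decidable (Pre_getVersionToReleaseNotesMap releaseJsonObject groupId) := by unfold Pre_getVersionToReleaseNotesMap; infer_instance

def pvWitness_getVersionToReleaseNotesMap : (List (String × List (String × List (List (String × String))))) × String :=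
  ([("modules", [("androidx.core", [[("version", "1.0.0"), ("artifactId", "core")], [("version", "1.0.0"), ("artifactId", "core-ktx")], [("version", "1.1.0"), ("artifactId", "core-x")]])])], "androidx.core")

def Spec_getVersionToReleaseNotesMap (releaseJsonObject : List (String × List (String × List (List (String × String))))) (groupId : String) (out : List (String × List (List (String × String)))) : Prop := out = getVersionToReleaseNotesMap_alt releaseJsonObject groupId
instance (releaseJsonObject : List (String × List (String × List (List (String × String))))) (groupId : String) (out : List (String × List (List (String × String)))) : Decidable (Spec_getVersionToReleaseNotesMap releaseJsonObject groupId out) := by unfold Spec_getVersionToReleaseNotesMap; infer_instance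

-- ===== CLAIM (what is proved, stated in full; the proofs are below) =====
def Claim_equal_getVersionToReleaseNotesMap : Prop := ∀ (releaseJsonObject : List (String × List (String × List (List (String × String))))) (groupId : String), Dom_getVersionToReleaseNotesMap releaseJsonObject groupId → Pre_getVersionToReleaseNotesMap releaseJsonObject groupId → Spec_getVersionToReleaseNotesMap releaseJsonObject groupId (getVersionToReleaseNotesMap releaseJsonObject groupId)

-- ===== LEMMAS AND PROOFS =====

-- A's loop body is exactly dict-modify: append when the key exists, start a fresh singleton otherwise.
theorem pv_step_eq_modify :
    (fun (d : PySem.Dict String (List (List (String × String)))) artifact =>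
      if d.contains (pvVer artifact) then
        d.insert (pvVer artifact) (d.getD (pvVer artifact) [] ++ [artifact])
      else
        d.insert (pvVer artifact) [artifact])
    = (fun d artifact => d.modify (pvVer artifact) [] (· ++ [artifact])) := by
  funext d a
  by_cases h : d.contains (pvVer a) = true
  · simp [h, PySem.Dict.modify]
  · simp [h, PySem.Dict.modify,
      PySem.Dict.getD_of_not_contains d [] (by simpa using h)]

-- A's accumulated dict, read back as an items list, is the grouping formula:
-- the deduped versions in first-occurrence order, each with its filtered artifact list.
theorem pv_grouping_eq (l : List (List (String × String))) :
    (l.foldl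
      (fun d artifact =>
        if d.contains (pvVer artifact) then
          d.insert (pvVer artifact) (d.getD (pvVer artifact) [] ++ [artifact])
        else
          d.insert (pvVer artifact) [artifact])
      PySem.Dict.empty).items
    = (PySem.List.dedup (l.map pvVer)).map (fun v => (v, l.filter (fun a => pvVer a == v))) := by
  rw [pv_step_eq_modify]
  have hnd : (l.foldl (fun d artifact => d.modify (pvVer artifact) [] (· ++ [artifact]))
      PySem.Dict.empty).keys.Nodup :=
    PySem.Dict.nodup_keys_foldl_modify_key l pvVer [] (fun _ a => (· ++ [a])) PySem.Dict.empty
      (by simp)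
  rw [PySem.Dict.items_eq_map_keys _ hnd []]
  have hkeys : (l.foldl (fun d artifact => d.modify (pvVer artifact) [] (· ++ [artifact]))
      PySem.Dict.empty).keys = PySem.List.dedup (l.map pvVer) := by
    rw [PySem.Dict.keys_foldl_modify_key]
    simp [PySem.Set.update_nil_left]
  rw [hkeys]
  refine List.map_congr_left (fun v _ => ?_)
  have hfold : l.foldl (fun d artifact => d.modify (pvVer artifact) [] (· ++ [artifact]))
      PySem.Dict.empty
      = (l.map (fun a => (pvVer a, a))).foldl (fun d p => d.modify p.1 [] (· ++ [p.2]))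
          PySem.Dict.empty := by
    rw [List.foldl_map]
  rw [hfold, PySem.Dict.getD_foldl_modify_append]
  simp [List.filter_map, Function.comp_def]

-- folding Set.add over u starting from a set containing v skips v's occurrences
theorem pv_foldl_add_filter (v : String) :
    ∀ (u s : List String), v ∈ s →
      u.foldl PySem.Set.add s = (u.filter (fun x => x != v)).foldl PySem.Set.add s := by
  intro u
  induction u with
  | nil => intro s _; rfl
  | cons x u ih =>
    intro s hv
    by_cases hx : x = v
    · subst hx
      have : PySem.Set.add s x = s := by
        simp [PySem.Set.add, PySem.Set.contains, hv]
      simp [this, ih s hv]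
    · have hv' : v ∈ PySem.Set.add s x := by
        simp [PySem.Set.add]; split <;> simp [hv]
      simp [hx, ih _ hv']

-- folding Set.add from (v :: s) where no element equals v keeps v in front
theorem pv_foldl_add_cons (v : String) :
    ∀ (u s : List String), (∀ x ∈ u, x ≠ v) →
      u.foldl PySem.Set.add (v :: s) = v :: u.foldl PySem.Set.add s := by
  intro u
  induction u with
  | nil => intro s _; rfl
  | cons x u ih =>
    intro s h
    have hx : x ≠ v := h x (by simp)
    have hstep : PySem.Set.add (v :: s) x = v :: PySem.Set.add s x := by
      have hxb : (x == v) = false := by simpa using hx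
      simp only [PySem.Set.add, PySem.Set.contains, List.contains_cons, hxb, Bool.false_or]
      split <;> simp
    rw [List.foldl_cons, hstep, ih _ (fun y hy => h y (by simp [hy])), List.foldl_cons]

-- dedup of a cons: the head, then the dedup of the tail with the head's value removed
theorem pv_dedup_cons (v : String) (t : List String) :
    PySem.List.dedup (v :: t) = v :: PySem.List.dedup (t.filter (fun x => x != v)) := by
  have h1 : PySem.List.dedup (v :: t) = t.foldl PySem.Set.add [v] := by
    simp [PySem.List.dedup_eq_ofList, PySem.Set.ofList_eq_foldl, List.foldl_cons,
      PySem.Set.add, PySem.Set.contains]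
  rw [h1, pv_foldl_add_filter v t [v] (by simp)]
  rw [pv_foldl_add_cons v _ [] (by intro x hx; simpa using (List.of_mem_filter hx))]
  simp [PySem.List.dedup_eq_ofList, PySem.Set.ofList_eq_foldl]

-- B's recursive partition computes the same grouping formula
theorem pv_group_eq_aux (n : Nat) :
    ∀ (l : List (List (String × String))), l.length ≤ n →
    pvGroup l
      = (PySem.List.dedup (l.map pvVer)).map (fun v => (v, l.filter (fun a => pvVer a == v))) := by
  induction n with
  | zero =>
    intro l hl
    have : l = [] := List.length_eq_zero_iff.mp (Nat.le_zero.mp hl)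
    subst this
    rw [pvGroup]
    simp [PySem.List.dedup_eq_ofList, PySem.Set.ofList_eq_foldl]
  | succ n ih =>
    intro l hl
    match l with
    | [] =>
      rw [pvGroup]
      simp [PySem.List.dedup_eq_ofList, PySem.Set.ofList_eq_foldl]
    | head :: rest =>
      rw [pvGroup]
      rw [ih (rest.filter (fun a => pvVer a != pvVer head))
        (le_trans (List.length_filter_le _ rest) (by simpa using hl))]
      rw [List.map_cons, pv_dedup_cons (pvVer head)]
      have hmap : (rest.filter (fun a => pvVer a != pvVer head)).map pvVer
          = (rest.map pvVer).filter (fun x => x != pvVer head) := by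
        rw [List.filter_map]; rfl
      rw [List.map_cons, ← hmap]
      congr 1
      · simp
      · refine List.map_congr_left (fun w hw => ?_)
        have hwne : w ≠ pvVer head := by
          have := (PySem.List.mem_dedup _ _).mp hw
          rcases List.mem_map.mp this with ⟨a, ha, rfl⟩
          simpa using (List.of_mem_filter ha)
        have hhead : (pvVer head == w) = false := by
          simpa using fun h => hwne h.symm
        simp only [List.filter_cons, hhead, Bool.false_eq_true, if_false]
        congr 1
        rw [List.filter_filter]
        refine List.filter_congr (fun a _ => ?_)
        by_cases h : pvVer a = w
        · simp [h, hwne]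
        · simp [h]

theorem pv_group_eq (l : List (List (String × String))) :
    pvGroup l
      = (PySem.List.dedup (l.map pvVer)).map (fun v => (v, l.filter (fun a => pvVer a == v))) :=
  pv_group_eq_aux l.length l le_rfl

-- ===== VERDICT (by name: the statement is the Claim_ definition above) =====
theorem getVersionToReleaseNotesMap_spec : Claim_equal_getVersionToReleaseNotesMap := by
  intro releaseJsonObject groupId _ _
  show getVersionToReleaseNotesMap releaseJsonObject groupId
      = getVersionToReleaseNotesMap_alt releaseJsonObject groupId
  unfold getVersionToReleaseNotesMap getVersionToReleaseNotesMap_alt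
  rw [pv_grouping_eq, pv_group_eq]
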